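-- pv_equiv track=rewrite | github.com/Jackylyn1/cs50 | credit.py | sum_every2
-- ===== SOURCE A (Python) =====
-- def sum_every2(number, start):
--     sum = 0
--     number //= start
--     while number > 0:
--         summand = number % 10
--         if start == 10:
--             summand *= 2
--         number //= 100
--         if start == 10:
--             while summand > 9:
--                 sum += summand % start
--                 summand //= 10
--             sum += summand % start
--         else:
--             sum += summand
--     return sum
-- ===== SOURCE B (Python) =====
-- def sum_every2(number, start):
--     n = number // start
--     digits = []
--     while n > 0:
--         digits.append(n % 10)
--         n //= 100
--     if start == 10:
--         return sum(d + d if d + d < 10 else d + d - 9 for d in digits)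
--     return sum(digits)
-- ===== Notes on version B (the rewrite author's own statement) =====
-- stated objective: simpler
-- what changed: B separates digit extraction (one flat loop collecting every-other digit into a list) from summation, and replaces A's nested digit-summing while loop with the closed Luhn form d+d if d+d<10 else d+d-9.
import Mathlib
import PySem

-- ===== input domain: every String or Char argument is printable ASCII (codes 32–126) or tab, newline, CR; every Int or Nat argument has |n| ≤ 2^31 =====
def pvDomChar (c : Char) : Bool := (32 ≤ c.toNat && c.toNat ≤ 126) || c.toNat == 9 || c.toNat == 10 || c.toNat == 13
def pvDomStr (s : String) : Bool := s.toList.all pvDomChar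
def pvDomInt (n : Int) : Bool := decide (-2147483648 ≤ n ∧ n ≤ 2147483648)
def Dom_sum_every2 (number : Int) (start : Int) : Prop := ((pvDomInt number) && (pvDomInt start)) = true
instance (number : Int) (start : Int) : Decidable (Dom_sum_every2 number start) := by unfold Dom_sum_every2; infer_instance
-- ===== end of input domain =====

-- B replaces A's nested digit-summing while loop by the closed Luhn form and
-- separates digit extraction from summation (objective: simpler).


-- ===== PORT A =====
-- inner 'while summand > 9' loop followed by the trailing 'sum += summand % start'
def sumEvery2InnerA (summand : Int) (start : Int) (sum : Int) : Int :=
  if 9 < summand then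
    sumEvery2InnerA (PySem.Int.floordiv summand 10) start (sum + PySem.Int.mod summand start)
  else
    sum + PySem.Int.mod summand start
termination_by summand.toNat
decreasing_by
  have h10 : PySem.Int.floordiv summand 10 = summand / 10 :=
    PySem.Int.floordiv_eq_ediv_of_pos (by norm_num)
  rw [h10]; omega

-- outer 'while number > 0' loop
def sumEvery2OuterA (number : Int) (start : Int) (sum : Int) : Int :=
  if 0 < number then
    let summand0 := PySem.Int.mod number 10
    let summand := if start = 10 then summand0 * 2 else summand0
    let number' := PySem.Int.floordiv number 100
    if start = 10 then
      sumEvery2OuterA number' start (sumEvery2InnerA summand start sum)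
    else
      sumEvery2OuterA number' start (sum + summand)
  else
    sum
termination_by number.toNat
decreasing_by
  all_goals
    have h100 : PySem.Int.floordiv number 100 = number / 100 :=
      PySem.Int.floordiv_eq_ediv_of_pos (by norm_num)
    simp only [h100]; omega

def sum_every2 (number : Int) (start : Int) : Int :=
  sumEvery2OuterA (PySem.Int.floordiv number start) start 0

-- ===== PORT B =====
-- phase 1: collect every-other digit (n % 10, then n //= 100) into a list
def sumEvery2Digits (n : Int) : List Int :=
  if 0 < n then
    PySem.Int.mod n 10 :: sumEvery2Digits (PySem.Int.floordiv n 100)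
  else
    []
termination_by n.toNat
decreasing_by
  have h100 : PySem.Int.floordiv n 100 = n / 100 :=
    PySem.Int.floordiv_eq_ediv_of_pos (by norm_num)
  rw [h100]; omega

-- phase 2: sum (closed Luhn form when start == 10)
def sum_every2_alt (number : Int) (start : Int) : Int :=
  let digits := sumEvery2Digits (PySem.Int.floordiv number start)
  if start = 10 then
    (digits.map (fun d => if d + d < 10 then d + d else d + d - 9)).sum
  else
    digits.sum

-- ===== PRECONDITION & SPEC =====
-- Pre_ excludes exactly start = 0, where Python's 'number //= start' raises ZeroDivisionError.
def Pre_sum_every2 (number : Int) (start : Int) : Prop := start ≠ 0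
instance (number : Int) (start : Int) : Decidable (Pre_sum_every2 number start) := by
  unfold Pre_sum_every2; infer_instance
def pvWitness_sum_every2 : Int × Int := (4016, 10)

def Spec_sum_every2 (number : Int) (start : Int) (out : Int) : Prop := out = sum_every2_alt number start
instance (number : Int) (start : Int) (out : Int) : Decidable (Spec_sum_every2 number start out) := by unfold Spec_sum_every2; infer_instance

-- ===== CLAIM (what is proved, stated in full; the proofs are below) =====
def Claim_equal_sum_every2 : Prop := ∀ (number : Int) (start : Int), Dom_sum_every2 number start → Pre_sum_every2 number start → Spec_sum_every2 number start (sum_every2 number start)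

-- ===== LEMMAS AND PROOFS =====

theorem mod10_bounds (n : Int) : 0 ≤ PySem.Int.mod n 10 ∧ PySem.Int.mod n 10 < 10 :=
  ⟨PySem.Int.mod_nonneg (a := n) (b := 10) (by norm_num),
   PySem.Int.mod_lt (a := n) (b := 10) (by norm_num)⟩

-- the inner loop on a doubled digit computes the closed Luhn form
theorem innerA_eval (d sum : Int) (h0 : 0 ≤ d) (h9 : d < 10) :
    sumEvery2InnerA (d * 2) 10 sum = sum + (if d + d < 10 then d + d else d + d - 9) := by
  interval_cases d <;>
    simp [sumEvery2InnerA, PySem.Int.mod, PySem.Int.floordiv] <;> ring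

def luhnVal (start : Int) (l : List Int) : Int :=
  if start = 10 then (l.map (fun d => if d + d < 10 then d + d else d + d - 9)).sum
  else l.sum

theorem outerA_eval (start : Int) (k : Nat) (n sum : Int) (hk : n.toNat ≤ k) :
    sumEvery2OuterA n start sum = sum + luhnVal start (sumEvery2Digits n) := by
  induction k generalizing n sum with
  | zero =>
      have hn : ¬ 0 < n := by omega
      rw [sumEvery2OuterA, sumEvery2Digits]
      simp [hn, luhnVal]
  | succ k ih =>
      rw [sumEvery2OuterA, sumEvery2Digits]
      by_cases hn : 0 < n
      · have h100 : PySem.Int.floordiv n 100 = n / 100 :=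
          PySem.Int.floordiv_eq_ediv_of_pos (by norm_num)
        have hk' : (PySem.Int.floordiv n 100).toNat ≤ k := by rw [h100]; omega
        have hb := mod10_bounds n
        by_cases h10 : start = 10
        · subst h10
          simp only [hn, if_true, if_pos]
          rw [ih _ _ hk', innerA_eval _ _ hb.1 hb.2]
          simp [luhnVal, List.sum_cons]; ring
        · simp only [hn, if_true, if_neg h10]
          rw [ih _ _ hk']
          simp [luhnVal, if_neg h10, List.sum_cons]; ring
      · simp [hn, luhnVal]

-- ===== VERDICT (by name: the statement is the Claim_ definition above) =====
theorem sum_every2_spec : Claim_equal_sum_every2 := by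
  intro number start _ _
  unfold Spec_sum_every2 sum_every2 sum_every2_alt
  rw [outerA_eval start (PySem.Int.floordiv number start).toNat _ _ le_rfl]
  simp [luhnVal]
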